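-- pv_equiv track=rewrite | github.com/Nicholas-Ho/CUES_Hackathon_2024 | frontend_logic/graphics_utils.py | generate_speech_bubble
-- ===== SOURCE A (Python) =====
-- from collections import deque
--
-- def generate_speech_bubble(content: str, width=30):
--     width = max(min(width, len(content)+2), len(max(content.split(), key=lambda x: len(x)))+1)
--     bubble = []
--     bubble.append(' ' + '_' * (width + 1) + ' ')
--
--     words = deque(content.split())
--     chars_in_line = width
--     curr_line = '/'
--     while len(words) > 0:
--         if chars_in_line < len(words[0]) + 1:
--             curr_line += ' ' * chars_in_line
--             curr_line += ' \\' if curr_line[0] == '/' else ' |'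
--             bubble.append(curr_line)
--             chars_in_line = width
--             curr_line = '|'
--         curr_line += ' ' + words[0]
--         chars_in_line -= len(words[0]) + 1
--         words.popleft()
--     curr_line += ' ' * chars_in_line
--     curr_line += ' \\' if curr_line[0] == '/' else ' |'
--     bubble.append(curr_line)
--
--     bubble.append('\\' + '_' * (width + 1) + '/')
--     return bubble
-- ===== SOURCE B (Python) =====
-- def generate_speech_bubble(content: str, width=30):
--     words = content.split()
--     width = max(min(width, len(content)+2), len(max(words, key=lambda x: len(x)))+1)
--     # pass 1: greedily pack words into line groups, remembering leftover capacity
--     groups = []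
--     cur, rem = [], width
--     for w in words:
--         if rem < len(w) + 1:
--             groups.append((cur, rem))
--             cur, rem = [w], width - (len(w) + 1)
--         else:
--             cur.append(w)
--             rem -= len(w) + 1
--     groups.append((cur, rem))
--     # pass 2: render
--     lines = [' ' + '_' * (width + 1) + ' ']
--     for i, (g, r) in enumerate(groups):
--         body = ''.join(' ' + w for w in g) + ' ' * r
--         lines.append(('/' + body + ' \\') if i == 0 else ('|' + body + ' |'))
--     lines.append('\\' + '_' * (width + 1) + '/')
--     return lines
-- ===== Notes on version B (the rewrite author's own statement) =====
-- stated objective: alternative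
-- what changed: Replaces A's single while-loop over a deque that builds, closes and emits each bordered line in-place with a two-pass design: one fold that greedily packs words into (group, leftover-capacity) records, then a separate render pass that maps groups to lines by index (first group '/..\', rest '|..|').
import Mathlib
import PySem

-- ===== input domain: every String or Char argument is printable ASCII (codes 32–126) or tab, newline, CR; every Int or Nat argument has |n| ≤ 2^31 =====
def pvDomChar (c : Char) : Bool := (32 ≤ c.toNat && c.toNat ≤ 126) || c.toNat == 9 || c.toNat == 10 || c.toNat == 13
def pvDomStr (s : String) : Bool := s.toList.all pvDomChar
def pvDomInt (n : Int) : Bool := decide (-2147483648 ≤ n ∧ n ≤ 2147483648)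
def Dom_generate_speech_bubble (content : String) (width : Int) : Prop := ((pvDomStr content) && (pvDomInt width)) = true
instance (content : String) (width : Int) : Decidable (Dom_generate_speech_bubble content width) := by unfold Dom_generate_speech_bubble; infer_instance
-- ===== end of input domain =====

-- B replaces A's single while-loop that builds/closes each bordered line in place by a two-pass
-- decomposition (pack words into (group, leftover) records, then render them); return values agree
-- on every input where A returns (A raises ValueError on whitespace-only content, excluded by Pre_).

-- ===== PORT A =====
-- close the current line: pad with the leftover spaces, border by the line's first character
def pvCloseA (curr : List Char) (rem : Int) : List Char :=
  curr ++ List.replicate rem.toNat ' ' ++ (if curr.head? == some '/' then [' ', '\\'] else [' ', '|'])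

-- the while-loop over the deque of words; state = (words, chars_in_line, curr_line, bubble)
def pvLoopA (W : Int) : List (List Char) → Int → List Char → List (List Char) → List (List Char)
  | [], rem, curr, bubble => bubble ++ [pvCloseA curr rem]
  | w :: ws, rem, curr, bubble =>
    if rem < (w.length : Int) + 1 then
      pvLoopA W ws (W - ((w.length : Int) + 1)) ('|' :: ' ' :: w) (bubble ++ [pvCloseA curr rem])
    else
      pvLoopA W ws (rem - ((w.length : Int) + 1)) (curr ++ ' ' :: w) bubble

def generate_speech_bubble (content : String) (width : Int) : List String :=
  let cs := content.toList
  let words := PySem.Chars.split₀ cs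
  match PySem.List.max? words (fun x => (x.length : Int)) with
  | none => []  -- Python raises ValueError here (max of empty sequence); outside Pre_
  | some longest =>
    let W := max (min width ((cs.length : Int) + 2)) ((longest.length : Int) + 1)
    let top : List Char := ' ' :: (List.replicate (W + 1).toNat '_' ++ [' '])
    let bot : List Char := '\\' :: (List.replicate (W + 1).toNat '_' ++ ['/'])
    (pvLoopA W words W ['/'] [top] ++ [bot]).map String.ofList

-- ===== PORT B =====
-- pass 1 step: pack one word, recording the closed group and its leftover capacity
def pvStepB (W : Int) (st : List (List (List Char) × Int) × List (List Char) × Int)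
    (w : List Char) : List (List (List Char) × Int) × List (List Char) × Int :=
  if st.2.2 < (w.length : Int) + 1 then
    (st.1 ++ [(st.2.1, st.2.2)], [w], W - ((w.length : Int) + 1))
  else
    (st.1, st.2.1 ++ [w], st.2.2 - ((w.length : Int) + 1))

-- pass 2: render one group, borders chosen by its index
def pvRenderB (i : Int) (g : List (List Char)) (r : Int) : List Char :=
  (if i == 0 then '/' else '|') ::
    (g.flatMap (fun w => ' ' :: w) ++ List.replicate r.toNat ' ' ++
      [' ', if i == 0 then '\\' else '|'])

def generate_speech_bubble_alt (content : String) (width : Int) : List String :=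
  let cs := content.toList
  let words := PySem.Chars.split₀ cs
  match PySem.List.max? words (fun x => (x.length : Int)) with
  | none => []  -- Python raises ValueError here (max of empty sequence); outside Pre_
  | some longest =>
    let W := max (min width ((cs.length : Int) + 2)) ((longest.length : Int) + 1)
    let st := words.foldl (pvStepB W) ([], [], W)
    let groups := st.1 ++ [(st.2.1, st.2.2)]
    let top : List Char := ' ' :: (List.replicate (W + 1).toNat '_' ++ [' '])
    let bot : List Char := '\\' :: (List.replicate (W + 1).toNat '_' ++ ['/'])
    ((top :: (PySem.List.enumerate groups 0).map (fun p => pvRenderB p.1 p.2.1 p.2.2)) ++ [bot]).map String.ofList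

-- ===== PRECONDITION & SPEC =====
-- Pre_ excludes content with no words (whitespace-only), on which Python A raises ValueError
def Pre_generate_speech_bubble (content : String) (width : Int) : Prop :=
  PySem.Str.split₀ content ≠ []
instance (content : String) (width : Int) : Decidable (Pre_generate_speech_bubble content width) := by unfold Pre_generate_speech_bubble; infer_instance

def pvWitness_generate_speech_bubble : String × Int := ("hello there", 8)

def Spec_generate_speech_bubble (content : String) (width : Int) (out : List String) : Prop := out = generate_speech_bubble_alt content width
instance (content : String) (width : Int) (out : List String) : Decidable (Spec_generate_speech_bubble content width out) := by unfold Spec_generate_speech_bubble; infer_instance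

-- ===== CLAIM (what is proved, stated in full; the proofs are below) =====
def Claim_equal_generate_speech_bubble : Prop := ∀ (content : String) (width : Int), Dom_generate_speech_bubble content width → Pre_generate_speech_bubble content width → Spec_generate_speech_bubble content width (generate_speech_bubble content width)

-- ===== LEMMAS AND PROOFS =====

-- render groups: first line with char c (border by c), the rest with '|'
def pvRenderAll : Char → List (List (List Char) × Int) → List (List Char)
  | _, [] => []
  | c, (g, r) :: rest =>
      (c :: (g.flatMap (fun w => ' ' :: w) ++ List.replicate r.toNat ' ' ++
        [' ', if c == '/' then '\\' else '|'])) :: pvRenderAll '|' rest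

lemma pvBorder (c : Char) :
    (if c = '/' then [' ', '\\'] else [' ', '|']) = [' ', if c = '/' then '\\' else '|'] := by
  split_ifs <;> rfl

lemma pvStepB_split (W : Int) (ws : List (List Char)) :
    ∀ gs cur rem, ws.foldl (pvStepB W) (gs, cur, rem) =
      (gs ++ (ws.foldl (pvStepB W) ([], cur, rem)).1,
        (ws.foldl (pvStepB W) ([], cur, rem)).2) := by
  induction ws with
  | nil => intro gs cur rem; simp [List.foldl_nil]
  | cons w ws ih =>
    intro gs cur rem
    simp only [List.foldl_cons, pvStepB, List.nil_append]
    split_ifs with h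
    · rw [ih (gs ++ [(cur, rem)]) [w] (W - ((w.length : Int) + 1)),
        ih [(cur, rem)] [w] (W - ((w.length : Int) + 1))]
      simp
    · exact ih gs (cur ++ [w]) (rem - ((w.length : Int) + 1))

lemma pvLoopA_eq (W : Int) (ws : List (List Char)) :
    ∀ rem cur (bubble : List (List Char)) (c : Char),
      pvLoopA W ws rem (c :: cur.flatMap (fun w => ' ' :: w)) bubble =
        bubble ++ pvRenderAll c ((ws.foldl (pvStepB W) ([], cur, rem)).1 ++
          [((ws.foldl (pvStepB W) ([], cur, rem)).2.1, (ws.foldl (pvStepB W) ([], cur, rem)).2.2)]) := by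
  induction ws with
  | nil =>
    intro rem cur bubble c
    simp [pvLoopA, pvCloseA, pvRenderAll, pvBorder]
  | cons w ws ih =>
    intro rem cur bubble c
    simp only [pvLoopA, List.foldl_cons, pvStepB, List.nil_append]
    split_ifs with h
    · have h1 : ('|' : Char) :: ' ' :: w = '|' :: [w].flatMap (fun v => ' ' :: v) := by simp
      rw [h1, ih (W - ((w.length : Int) + 1)) [w]
        (bubble ++ [pvCloseA (c :: cur.flatMap (fun v => ' ' :: v)) rem]) '|',
        pvStepB_split W ws [(cur, rem)] [w] (W - ((w.length : Int) + 1))]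
      simp [pvRenderAll, pvCloseA, pvBorder]
    · have h1 : (c :: cur.flatMap (fun v => ' ' :: v)) ++ ' ' :: w
          = c :: (cur ++ [w]).flatMap (fun v => ' ' :: v) := by simp
      rw [h1, ih (rem - ((w.length : Int) + 1)) (cur ++ [w]) bubble c]

lemma pvEnum_pos (ps : List (List (List Char) × Int)) :
    ∀ s : Int, 0 < s →
      (PySem.List.enumerate ps s).map (fun p => pvRenderB p.1 p.2.1 p.2.2) = pvRenderAll '|' ps := by
  induction ps with
  | nil => intro s _; simp [PySem.List.enumerate_nil, pvRenderAll]
  | cons p ps ih =>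
    intro s hs
    obtain ⟨g, r⟩ := p
    have hs0 : (s == (0 : Int)) = false := by simp; omega
    simp only [PySem.List.enumerate_cons, List.map_cons]
    rw [ih (s + 1) (by omega)]
    simp [pvRenderB, pvRenderAll, hs0]

lemma pvEnum_zero (ps : List (List (List Char) × Int)) :
    (PySem.List.enumerate ps 0).map (fun p => pvRenderB p.1 p.2.1 p.2.2) = pvRenderAll '/' ps := by
  cases ps with
  | nil => simp [PySem.List.enumerate_nil, pvRenderAll]
  | cons p ps =>
    obtain ⟨g, r⟩ := p
    simp only [PySem.List.enumerate_cons, List.map_cons, zero_add]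
    rw [pvEnum_pos ps 1 (by omega)]
    simp [pvRenderB, pvRenderAll]

-- ===== VERDICT (by name: the statement is the Claim_ definition above) =====
theorem generate_speech_bubble_spec : Claim_equal_generate_speech_bubble := by
  intro content width _ _
  unfold Spec_generate_speech_bubble generate_speech_bubble generate_speech_bubble_alt
  cases h : PySem.List.max? (PySem.Chars.split₀ content.toList) (fun x => (x.length : Int)) with
  | none => simp [h]
  | some longest =>
    simp only [h]
    rw [pvEnum_zero]
    have h2 := pvLoopA_eq
      (max (min width ((content.toList.length : Int) + 2)) ((longest.length : Int) + 1))
      (PySem.Chars.split₀ content.toList)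
      (max (min width ((content.toList.length : Int) + 2)) ((longest.length : Int) + 1))
      [] [' ' :: (List.replicate ((max (min width ((content.toList.length : Int) + 2)) ((longest.length : Int) + 1)) + 1).toNat '_' ++ [' '])] '/'
    simp only [List.flatMap_nil] at h2
    rw [h2]
    simp
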